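-- pv_equiv track=rewrite | github.com/NickvisionApps/Parabolic | resources/yt-dlp-plugins/yt-dlp-hianime/yt_dlp_plugins/extractor/megacloud.py | _shuffle_sources
-- ===== SOURCE A (Python) =====
-- def _shuffle_sources(sources: list[str], key: str) -> list[str]:
--     array_count = len(sources) // len(key)
--     arrays = [[""] * len(key) for _ in range(array_count)]
--
--     key_dict = {i: char for i, char in enumerate(key)}
--     key_sorted = {i: char for i, char in sorted(key_dict.items(), key=lambda p: p[1])}
--
--     p = 0
--     for idx in key_sorted.keys():
--         for arr_idx in range(array_count):
--             char = sources[p]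
--             arrays[arr_idx][idx] = char
--             p += 1
--
--     sources = []
--     for arr in arrays:
--         sources.extend(arr)
--
--     return sources
-- ===== SOURCE B (Python) =====
-- def _shuffle_sources(sources: list[str], key: str) -> list[str]:
--     array_count = len(sources) // len(key)
--     order = sorted(range(len(key)), key=lambda i: key[i])
--     rank_of = [0] * len(key)
--     for r, idx in enumerate(order):
--         rank_of[idx] = r
--     return [sources[rank_of[idx] * array_count + arr]
--             for arr in range(array_count) for idx in range(len(key))]
-- ===== Notes on version B (the rewrite author's own statement) =====
-- stated objective: simpler
-- what changed: Replaces A's mutable 2D grid filled column-major with a running counter and a final extend loop by an inverted argsort of the key (per-column sorted rank) and a single flat comprehension that indexes sources directly, avoiding the grid allocation and per-cell mutation.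
import Mathlib
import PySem

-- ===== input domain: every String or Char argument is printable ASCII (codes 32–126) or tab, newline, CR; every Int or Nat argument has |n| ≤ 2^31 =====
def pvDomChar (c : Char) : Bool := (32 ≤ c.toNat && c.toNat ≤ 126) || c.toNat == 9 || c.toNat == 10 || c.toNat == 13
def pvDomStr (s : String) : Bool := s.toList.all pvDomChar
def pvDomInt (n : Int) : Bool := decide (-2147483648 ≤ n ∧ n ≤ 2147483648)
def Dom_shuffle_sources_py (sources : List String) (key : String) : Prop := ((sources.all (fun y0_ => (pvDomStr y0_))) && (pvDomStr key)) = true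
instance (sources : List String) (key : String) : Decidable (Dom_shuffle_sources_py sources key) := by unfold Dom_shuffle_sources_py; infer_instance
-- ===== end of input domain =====

-- B replaces A's mutable 2D grid (filled column-major with a running counter, then flattened)
-- by an inverted argsort of the key and one flat indexing comprehension; objective: simpler.

-- ===== PORT A =====
-- literal transliteration of _shuffle_sources; all indices A uses are in range whenever key ≠ ""
def shuffle_sources_py (sources : List String) (key : String) : List String :=
  let kcs := key.toList
  let array_count : Nat := sources.length / kcs.length   -- len(sources) // len(key); Pre_ excludes len(key) = 0
  let arrays : List (List String) := (List.range array_count).map (fun _ => List.replicate kcs.length "")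
  let key_dict : List (Int × Char) := PySem.List.enumerate kcs        -- {i: char for i, char in enumerate(key)}
  let key_sorted : List (Int × Char) := PySem.List.sorted key_dict (fun p => p.2)   -- sorted(items, key=p[1]); distinct keys, so dict order = this list
  let st := key_sorted.foldl (fun (st : List (List String) × Nat) pr =>
      (List.range array_count).foldl (fun (st2 : List (List String) × Nat) a =>
          (st2.1.set a ((st2.1.getD a []).set pr.1.toNat (sources.getD st2.2 "")), st2.2 + 1)) st)
    (arrays, 0)
  st.1.foldl (fun acc arr => acc ++ arr) []

-- ===== PORT B =====
-- literal transliteration of Source B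
def shuffle_sources_py_alt (sources : List String) (key : String) : List String :=
  let kcs := key.toList
  let n := kcs.length
  let array_count : Nat := sources.length / n            -- len(sources) // len(key)
  let order : List Nat := PySem.List.sorted (List.range n) (fun i => kcs.getD i ' ')
  let rank_of : List Nat := (PySem.List.enumerate order).foldl (fun rk pr => rk.set pr.2 pr.1.toNat) (List.replicate n 0)
  (List.range array_count).flatMap (fun arr =>
    (List.range n).map (fun idx => sources.getD (rank_of.getD idx 0 * array_count + arr) ""))

-- ===== PRECONDITION & SPEC =====
-- Pre_ excludes exactly key = "", where A (and B) raise ZeroDivisionError on len(sources) // len(key)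
def Pre_shuffle_sources_py (sources : List String) (key : String) : Prop := key ≠ ""
instance (sources : List String) (key : String) : Decidable (Pre_shuffle_sources_py sources key) := by unfold Pre_shuffle_sources_py; infer_instance
def pvWitness_shuffle_sources_py : List String × String := (["a", "b", "c", "d"], "ba")

def Spec_shuffle_sources_py (sources : List String) (key : String) (out : List String) : Prop := out = shuffle_sources_py_alt sources key
instance (sources : List String) (key : String) (out : List String) : Decidable (Spec_shuffle_sources_py sources key out) := by unfold Spec_shuffle_sources_py; infer_instance

-- ===== CLAIM (what is proved, stated in full; the proofs are below) =====
def Claim_equal_shuffle_sources_py : Prop := ∀ (sources : List String) (key : String), Dom_shuffle_sources_py sources key → Pre_shuffle_sources_py sources key → Spec_shuffle_sources_py sources key (shuffle_sources_py sources key)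

-- ===== LEMMAS AND PROOFS =====

-- foldl-extend is flatten
lemma foldl_append_eq_flatten (l : List (List String)) : l.foldl (fun acc arr => acc ++ arr) [] = l.flatten := by
  induction l using List.reverseRecOn with
  | nil => rfl
  | append_singleton xs x ih => simp [List.foldl_append, ih]

-- insertBy commutes with a map whose comparison agrees
lemma insertBy_map {α β : Type} (f : α → β) (x : α) (ys : List α) (b : β → β → Bool) (b' : α → α → Bool)
    (h : ∀ a c, b (f a) (f c) = b' a c) :
    PySem.List.insertBy b (f x) (ys.map f) = (PySem.List.insertBy b' x ys).map f := by
  induction ys with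
  | nil => simp [PySem.List.insertBy]
  | cons y t ih => simp [PySem.List.insertBy, h]; split <;> simp [ih]

-- stable sort commutes with a map the key factors through
lemma sorted_map {α β κ : Type} [LT κ] [DecidableLT κ] (f : α → β) (l : List α) (key : β → κ) :
    PySem.List.sorted (l.map f) key false = (PySem.List.sorted l (fun x => key (f x)) false).map f := by
  rw [PySem.List.sorted_eq_foldl_insertBy, PySem.List.sorted_eq_foldl_insertBy]
  have main : ∀ (l : List α) (acc : List α),
      (l.map f).foldl (fun acc x => PySem.List.insertBy (fun a b => decide (key a < key b)) x acc) (acc.map f)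
        = (l.foldl (fun acc x => PySem.List.insertBy (fun a b => decide (key (f a) < key (f b))) x acc) acc).map f := by
    intro l
    induction l with
    | nil => intro acc; simp
    | cons x t ih =>
      intro acc
      simp only [List.map_cons, List.foldl_cons]
      rw [insertBy_map f x acc _ _ (fun a c => rfl), ih]
  simpa using main l []

-- enumerate of a list from a Nat start, as a map over range
lemma enumerate_eq_map_range (xs : List Char) : ∀ (s : Nat),
    PySem.List.enumerate xs (s : Int) = (List.range xs.length).map (fun i => (((s + i : Nat) : Int), xs.getD i ' ')) := by
  induction xs with
  | nil => intro s; simp [PySem.List.enumerate_nil]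
  | cons x t ih =>
    intro s
    rw [PySem.List.enumerate_cons]
    have : ((s : Int) + 1) = ((s + 1 : Nat) : Int) := by push_cast; ring
    rw [this, ih (s + 1)]
    simp [List.range_succ_eq_map, List.map_map, Function.comp_def]
    intro a _; omega

def fillInnerStep (sources : List String) (idx : Nat) : (List (List String) × Nat) → Nat → (List (List String) × Nat) :=
  fun st2 a => (st2.1.set a ((st2.1.getD a []).set idx (sources.getD st2.2 "")), st2.2 + 1)

def fillOuterStep (sources : List String) (c : Nat) : (List (List String) × Nat) → Nat → (List (List String) × Nat) :=
  fun st idx => (List.range c).foldl (fillInnerStep sources idx) st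

-- the inner loop: advances p by c and sets column idx of the first c rows
lemma fill_inner (sources : List String) (idx : Nat) :
    ∀ (c : Nat) (arrays : List (List String)) (p : Nat), c ≤ arrays.length →
      ((List.range c).foldl (fillInnerStep sources idx) (arrays, p)).2 = p + c
    ∧ ((List.range c).foldl (fillInnerStep sources idx) (arrays, p)).1.length = arrays.length
    ∧ ∀ a : Nat, ((List.range c).foldl (fillInnerStep sources idx) (arrays, p)).1.getD a []
        = if a < c then (arrays.getD a []).set idx (sources.getD (p + a) "") else arrays.getD a [] := by
  intro c
  induction c with
  | zero =>
    intro arrays p _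
    refine ⟨rfl, rfl, ?_⟩; intro a; simp
  | succ c ih =>
    intro arrays p h
    obtain ⟨hp, hl, hg⟩ := ih arrays p (by omega)
    rw [List.range_succ]
    simp only [List.foldl_append, List.foldl_cons, List.foldl_nil]
    refine ⟨?_, ?_, ?_⟩
    · simp only [fillInnerStep]; omega
    · simp [fillInnerStep, hl]
    · intro a
      simp only [fillInnerStep]
      by_cases hac : a = c
      · subst hac
        rw [List.getD_eq_getElem?_getD, List.getElem?_set_self (by omega),
            hg a, hp]
        simp
      · rw [List.getD_eq_getElem?_getD, List.getElem?_set_ne (by omega),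
            ← List.getD_eq_getElem?_getD, hg a]
        by_cases hlt : a < c
        · rw [if_pos hlt, if_pos (by omega)]
        · rw [if_neg hlt, if_neg (by omega)]

-- the outer loop over the sorted column order
lemma fill_outer (sources : List String) (n : Nat) :
    ∀ (os : List Nat) (c : Nat) (arrays : List (List String)) (p : Nat), os.Nodup → (∀ x ∈ os, x < n) →
      arrays.length = c → (∀ a, a < c → (arrays.getD a []).length = n) →
      (os.foldl (fillOuterStep sources c) (arrays, p)).1.length = c
    ∧ (∀ a, a < c → ((os.foldl (fillOuterStep sources c) (arrays, p)).1.getD a []).length = n)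
    ∧ ∀ a j, a < c →
        ((os.foldl (fillOuterStep sources c) (arrays, p)).1.getD a []).getD j ""
        = if j ∈ os then sources.getD (p + os.idxOf j * c + a) "" else (arrays.getD a []).getD j "" := by
  intro os
  induction os with
  | nil =>
    intro c arrays p _ _ hlen hrow
    refine ⟨hlen, ?_, ?_⟩
    · intro a ha; exact hrow a ha
    · intro a j _; simp
  | cons o t ih =>
    intro c arrays p hnd hmem hlen hrow
    simp only [List.foldl_cons]
    obtain ⟨hp1, hl1, hg1⟩ := fill_inner sources o c arrays p (by omega)
    have hstep : fillOuterStep sources c (arrays, p) o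
        = ((List.range c).foldl (fillInnerStep sources o) (arrays, p)) := rfl
    set arrays1 := ((List.range c).foldl (fillInnerStep sources o) (arrays, p)).1 with h1
    set p1 := ((List.range c).foldl (fillInnerStep sources o) (arrays, p)).2 with h2
    have hpair : fillOuterStep sources c (arrays, p) o = (arrays1, p1) := rfl
    rw [hpair]
    have hrow1 : ∀ a, a < c → (arrays1.getD a []).length = n := by
      intro a ha
      rw [hg1 a, if_pos ha, List.length_set]
      exact hrow a ha
    obtain ⟨hL, hR, hG⟩ := ih c arrays1 p1 hnd.of_cons (fun x hx => hmem x (List.mem_cons_of_mem _ hx))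
      (by rw [hl1, hlen]) hrow1
    refine ⟨hL, hR, ?_⟩
    intro a j ha
    rw [hG a j ha]
    have honotmem : o ∉ t := (List.nodup_cons.mp hnd).1
    by_cases hjt : j ∈ t
    · have hjo : j ≠ o := fun h => honotmem (h ▸ hjt)
      simp only [List.mem_cons, hjt, or_true, if_pos]
      rw [List.idxOf_cons_ne _ (fun h => hjo h.symm), hp1]
      congr 1
      rw [Nat.succ_eq_add_one]; ring
    · by_cases hjo : j = o
      · subst hjo
        simp only [hjt, if_false, List.mem_cons, true_or, if_true]
        rw [hg1 a]
        simp only [ha, if_true]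
        rw [List.idxOf_cons_self]
        have hjlt : j < (arrays.getD a []).length := by rw [hrow a ha]; exact hmem j (List.mem_cons_self)
        rw [List.getD_eq_getElem?_getD, List.getElem?_set_self hjlt]
        simp
      · simp only [hjt, if_false, List.mem_cons, hjo, or_false, if_false]
        rw [hg1 a]
        simp only [ha, if_true]
        rw [List.getD_eq_getElem?_getD, List.getElem?_set_ne (fun h => hjo h.symm),
            ← List.getD_eq_getElem?_getD]

-- rank_of inverts the order permutation
lemma rank_spec : ∀ (os : List Nat) (s : Nat) (rk : List Nat), os.Nodup → (∀ x ∈ os, x < rk.length) →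
    ∀ j, ((PySem.List.enumerate os (s : Int)).foldl (fun rk pr => rk.set pr.2 pr.1.toNat) rk).getD j 0
      = if j ∈ os then s + os.idxOf j else rk.getD j 0 := by
  intro os
  induction os with
  | nil => intro s rk _ _ j; simp [PySem.List.enumerate_nil]
  | cons o t ih =>
    intro s rk hnd hmem j
    rw [PySem.List.enumerate_cons]
    simp only [List.foldl_cons]
    have hc : ((s : Int) + 1) = ((s + 1 : Nat) : Int) := by push_cast; ring
    rw [hc, ih (s + 1) (rk.set o ((s : Int).toNat)) hnd.of_cons
      (fun x hx => by rw [List.length_set]; exact hmem x (List.mem_cons_of_mem _ hx)) j]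
    have honotmem : o ∉ t := (List.nodup_cons.mp hnd).1
    by_cases hjt : j ∈ t
    · have hjo : j ≠ o := fun h => honotmem (h ▸ hjt)
      simp only [List.mem_cons, hjt, or_true, if_pos]
      rw [List.idxOf_cons_ne _ (fun h => hjo h.symm)]
      omega
    · by_cases hjo : j = o
      · subst hjo
        simp only [hjt, if_false, List.mem_cons, true_or, if_true, List.idxOf_cons_self]
        have hjlt : j < rk.length := hmem j (List.mem_cons_self)
        rw [List.getD_eq_getElem?_getD, List.getElem?_set_self hjlt]
        simp
      · simp only [hjt, if_false, List.mem_cons, hjo, or_false, if_false]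
        rw [List.getD_eq_getElem?_getD, List.getElem?_set_ne (fun h => hjo h.symm),
            ← List.getD_eq_getElem?_getD]

-- ===== VERDICT (by name: the statement is the Claim_ definition above) =====
lemma sorted_range_key (kcs : List Char) :
    PySem.List.sorted (PySem.List.enumerate kcs) (fun p => p.2) false
      = (PySem.List.sorted (List.range kcs.length) (fun i => kcs.getD i ' ') false).map
          (fun (i : Nat) => ((i : Int), kcs.getD i ' ')) := by
  have h0 : PySem.List.enumerate kcs = PySem.List.enumerate kcs ((0 : Nat) : Int) := by norm_num
  rw [h0, enumerate_eq_map_range kcs 0]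
  simp only [Nat.zero_add]
  exact sorted_map (fun (i : Nat) => ((i : Int), kcs.getD i ' ')) (List.range kcs.length) (fun p => p.2)

theorem shuffle_sources_py_spec : Claim_equal_shuffle_sources_py := by
  intro sources key _ _
  unfold Spec_shuffle_sources_py shuffle_sources_py shuffle_sources_py_alt
  simp only []
  set kcs := key.toList with hkcs
  set n := kcs.length with hn
  set c := sources.length / n with hc
  set order : List Nat := PySem.List.sorted (List.range n) (fun i => kcs.getD i ' ') false with horder
  -- facts about order
  have hperm : order.Perm (List.range n) := PySem.List.sorted_perm _ _ _
  have hnd : order.Nodup := hperm.nodup_iff.mpr (List.nodup_range)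
  have hmem : ∀ x, x ∈ order ↔ x < n := by
    intro x; rw [hperm.mem_iff, List.mem_range]
  -- rewrite A's sorted dict as a map over order
  rw [sorted_range_key kcs, List.foldl_map]
  -- A's fold body is fillOuterStep
  have hbody : ∀ (st : List (List String) × Nat) (i : Nat),
      (List.range c).foldl (fun (st2 : List (List String) × Nat) a =>
          (st2.1.set a ((st2.1.getD a []).set (((i : Int), kcs.getD i ' ').1.toNat) (sources.getD st2.2 "")), st2.2 + 1)) st
        = fillOuterStep sources c st i := by
    intro st i; rfl
  rw [List.foldl_ext _ (fillOuterStep sources c) _ (fun st i _ => hbody st i)]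
  -- characterise the filled grid
  have hinit_len : ((List.range c).map (fun _ => List.replicate n ("" : String))).length = c := by simp
  have hinit_row : ∀ a, a < c → (((List.range c).map (fun _ => List.replicate n ("" : String))).getD a []) = List.replicate n "" := by
    intro a ha
    rw [List.getD_eq_getElem _ _ (by simpa using ha)]
    simp
  obtain ⟨hL, hR, hG⟩ := fill_outer sources n order c ((List.range c).map (fun _ => List.replicate n "")) 0
    hnd (fun x hx => (hmem x).mp hx) hinit_len
    (by intro a ha; rw [hinit_row a ha]; simp)
  set F := (order.foldl (fillOuterStep sources c) (((List.range c).map (fun _ => List.replicate n "")), 0)).1 with hF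
  -- B's rank_of
  have hrk0 : PySem.List.enumerate order = PySem.List.enumerate order ((0 : Nat) : Int) := by norm_num
  have hrank : ∀ j, j < n →
      ((PySem.List.enumerate order).foldl (fun rk pr => rk.set pr.2 pr.1.toNat) (List.replicate n 0)).getD j 0
        = order.idxOf j := by
    intro j hj
    rw [hrk0, rank_spec order 0 (List.replicate n 0) hnd
      (by intro x hx; simpa using (hmem x).mp hx) j]
    rw [if_pos ((hmem j).mpr hj)]
    omega
  -- equate the flattened grid with B's comprehension
  rw [foldl_append_eq_flatten]
  have hFeq : F = (List.range c).map (fun a => (List.range n).map (fun j =>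
      sources.getD (((PySem.List.enumerate order).foldl (fun rk pr => rk.set pr.2 pr.1.toNat) (List.replicate n 0)).getD j 0 * c + a) "")) := by
    apply List.ext_getElem
    · simp [hL]
    · intro a h1 h2
      have hac : a < c := by simpa [hL] using h1
      have hFa : F[a] = F.getD a [] := (List.getD_eq_getElem F [] h1).symm
      apply List.ext_getElem
      · rw [hFa, hR a hac]; simp
      · intro j hj1 hj2
        have hjn : j < n := by rw [hFa, hR a hac] at hj1; exact hj1
        have hjlen : j < (F.getD a []).length := by rw [hR a hac]; exact hjn
        rw [List.getElem_of_eq hFa, ← List.getD_eq_getElem (F.getD a []) "" hjlen, hG a j hac]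
        rw [if_pos ((hmem j).mpr hjn)]
        simp only [List.getElem_map, List.getElem_range]
        rw [hrank j hjn]
        ring_nf
  rw [hFeq]
  rfl
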